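-- pv_equiv track=rewrite | github.com/nalwayv/bitesofpy | bite_208/bite_208.py | find_number_pairs
-- ===== SOURCE A (Python) =====
-- def find_number_pairs(numbers, N=10):
--     result = []
--
--     for idx, num in enumerate(numbers):
--         for other in numbers[idx + 1:]:
--             if num + other == N:
--                 v = tuple([num, other])
--                 result.append(v)
--
--     return result
-- ===== SOURCE B (Python) =====
-- def find_number_pairs(numbers, N=10):
--     # one pass with a suffix-frequency dict instead of A's nested scans
--     suffix = {}
--     for num in numbers:
--         suffix[num] = suffix.get(num, 0) + 1
--     result = []
--     for num in numbers:
--         suffix[num] = suffix.get(num, 0) - 1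
--         result += [(num, N - num)] * suffix.get(N - num, 0)
--     return result
-- ===== Notes on version B (the rewrite author's own statement) =====
-- stated objective: faster
-- what changed: Replaced A's nested scan over all later elements with a single pass over a suffix-frequency dict: each num emits count(N-num) identical pairs.
import Mathlib
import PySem

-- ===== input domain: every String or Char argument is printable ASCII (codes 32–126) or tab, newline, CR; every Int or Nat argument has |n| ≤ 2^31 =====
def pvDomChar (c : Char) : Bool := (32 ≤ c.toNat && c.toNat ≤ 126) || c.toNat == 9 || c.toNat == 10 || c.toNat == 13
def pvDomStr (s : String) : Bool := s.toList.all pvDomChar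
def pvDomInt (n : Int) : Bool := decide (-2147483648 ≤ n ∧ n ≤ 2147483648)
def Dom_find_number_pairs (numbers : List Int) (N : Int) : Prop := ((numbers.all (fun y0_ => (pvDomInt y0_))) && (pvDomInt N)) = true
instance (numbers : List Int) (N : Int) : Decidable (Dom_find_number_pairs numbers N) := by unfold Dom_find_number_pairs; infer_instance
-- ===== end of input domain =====

-- B replaces A's quadratic nested scan by one pass over a suffix-frequency dict (asymptotically faster).

-- ===== PORT A =====
def find_number_pairs (numbers : List Int) (N : Int) : List (List Int) :=
  (PySem.List.enumerate numbers 0).foldl (fun result p =>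
    (PySem.List.slice numbers (some (p.1 + 1)) none).foldl (fun result other =>
      if p.2 + other == N then result ++ [[p.2, other]] else result) result) []

-- ===== PORT B =====
def find_number_pairs_alt (numbers : List Int) (N : Int) : List (List Int) :=
  let suffix : PySem.Dict Int Int :=
    numbers.foldl (fun d num => d.insert num (d.getD num 0 + 1)) PySem.Dict.empty
  (numbers.foldl (fun (st : PySem.Dict Int Int × List (List Int)) num =>
      let d := st.1.insert num (st.1.getD num 0 - 1)
      (d, st.2 ++ PySem.List.pyRepeat [[num, N - num]] (d.getD (N - num) 0)))
    (suffix, [])).2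

-- ===== PRECONDITION & SPEC =====
def Spec_find_number_pairs (numbers : List Int) (N : Int) (out : List (List Int)) : Prop := out = find_number_pairs_alt numbers N
instance (numbers : List Int) (N : Int) (out : List (List Int)) : Decidable (Spec_find_number_pairs numbers N out) := by unfold Spec_find_number_pairs; infer_instance

-- ===== CLAIM (what is proved, stated in full; the proofs are below) =====
def Claim_equal_find_number_pairs : Prop := ∀ (numbers : List Int) (N : Int), Dom_find_number_pairs numbers N → Spec_find_number_pairs numbers N (find_number_pairs numbers N)

-- ===== LEMMAS AND PROOFS =====

-- reference form both ports are reduced to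
def pairsSpec (numbers : List Int) (N : Int) : List (List Int) :=
  match numbers with
  | [] => []
  | x :: xs => List.replicate (xs.count (N - x)) [x, N - x] ++ pairsSpec xs N

lemma inner_fold_eq (x N : Int) (xs : List Int) (acc : List (List Int)) :
    xs.foldl (fun result other => if x + other == N then result ++ [[x, other]] else result) acc
      = acc ++ List.replicate (xs.count (N - x)) [x, N - x] := by
  rw [PySem.List.foldl_append_if]
  congr 1
  rw [List.filter_congr (q := fun o => o == N - x) (by intro o _; simp; omega)]
  rw [List.filter_beq]
  simp

lemma portA_gen (numbers : List Int) (N : Int) :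
    ∀ (l : List Int) (i : Nat) (acc : List (List Int)), l = numbers.drop i →
      (PySem.List.enumerate l (i : Int)).foldl (fun result p =>
        (PySem.List.slice numbers (some (p.1 + 1)) none).foldl (fun result other =>
          if p.2 + other == N then result ++ [[p.2, other]] else result) result) acc
        = acc ++ pairsSpec l N := by
  intro l
  induction l with
  | nil => intro i acc _; simp [PySem.List.enumerate_nil, pairsSpec]
  | cons x xs ih =>
    intro i acc hdrop
    rw [PySem.List.enumerate_cons, List.foldl_cons]
    have hxs : xs = numbers.drop (i + 1) := by
      have := congrArg List.tail hdrop
      simpa [List.tail_drop] using this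
    have hslice : PySem.List.slice numbers (some ((i : Int) + 1)) none = xs := by
      have : ((i : Int) + 1) = ((i + 1 : Nat) : Int) := by push_cast; ring
      rw [this, PySem.List.slice_from_natCast, ← hxs]
    have hcast : ((i : Int) + 1) = (((i + 1 : Nat)) : Int) := by push_cast; ring
    rw [hslice, inner_fold_eq, hcast, ih (i + 1) _ hxs, pairsSpec, List.append_assoc]

lemma portB_gen (N : Int) :
    ∀ (l : List Int) (d : PySem.Dict Int Int) (acc : List (List Int)),
      (∀ v, d.getD v 0 = (l.count v : Int)) →
      (l.foldl (fun (st : PySem.Dict Int Int × List (List Int)) num =>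
          let d := st.1.insert num (st.1.getD num 0 - 1)
          (d, st.2 ++ PySem.List.pyRepeat [[num, N - num]] (d.getD (N - num) 0)))
        (d, acc)).2 = acc ++ pairsSpec l N := by
  intro l
  induction l with
  | nil => intro d acc _; simp [pairsSpec]
  | cons x xs ih =>
    intro d acc hinv
    have hinv' : ∀ v, (d.insert x (d.getD x 0 - 1)).getD v 0 = (xs.count v : Int) := by
      intro v
      rw [PySem.Dict.getD_insert]
      by_cases hv : v = x
      · subst hv; rw [hinv]; simp
      · simp [hv, hinv v, Ne.symm hv]
    rw [List.foldl_cons]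
    simp only []
    rw [ih _ _ hinv']
    rw [pairsSpec, ← List.append_assoc]
    congr 2
    rw [hinv' (N - x), PySem.List.pyRepeat_singleton]
    simp

lemma portA_eq_spec (numbers : List Int) (N : Int) :
    find_number_pairs numbers N = pairsSpec numbers N := by
  have := portA_gen numbers N numbers 0 [] (by simp)
  simpa [find_number_pairs] using this

lemma portB_eq_spec (numbers : List Int) (N : Int) :
    find_number_pairs_alt numbers N = pairsSpec numbers N := by
  have hinit : ∀ v,
      (numbers.foldl (fun d num => d.insert num (d.getD num 0 + 1)) PySem.Dict.empty).getD v 0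
        = (numbers.count v : Int) := by
    intro v
    rw [PySem.Dict.getD_foldl_insert_add_one]
    simp
  have := portB_gen N numbers _ [] hinit
  simpa [find_number_pairs_alt] using this

-- ===== VERDICT (by name: the statement is the Claim_ definition above) =====
theorem find_number_pairs_spec : Claim_equal_find_number_pairs := by
  intro numbers N _
  unfold Spec_find_number_pairs
  rw [portA_eq_spec, portB_eq_spec]
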